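-- pv_equiv track=rewrite | github.com/adobe-mdsr/adobe-mdsr.github.io | update_publication_dates.py | should_update_tags
-- ===== SOURCE A (Python) =====
-- def should_update_tags(front_matter_text):
--     """Check if tags should be updated (only if they contain 'Source Themes')."""
--     in_tags_section = False
--     has_source_themes = False
--
--     for line in front_matter_text.strip().split('\n'):
--         if line.startswith('tags:'):
--             in_tags_section = True
--         elif in_tags_section and line.startswith('- '):
--             if 'Source Themes' in line:
--                 has_source_themes = True
--         elif in_tags_section and not line.startswith('- '):
--             in_tags_section = False
--
--     return has_source_themes
-- ===== SOURCE B (Python) =====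
-- def should_update_tags(front_matter_text):
--     """Check if tags should be updated (only if they contain 'Source Themes')."""
--     lines = front_matter_text.strip().split('\n')
--     for i, line in enumerate(lines):
--         if line.startswith('tags:'):
--             for nxt in lines[i + 1:]:
--                 if not nxt.startswith('- '):
--                     break
--                 if 'Source Themes' in nxt:
--                     return True
--     return False
-- ===== Notes on version B (the rewrite author's own statement) =====
-- stated objective: alternative
-- what changed: Replaces A's single stateful pass with an in_tags flag by a nested scan: for each tags-header line an inner loop checks the immediately following dash-list items and returns True on the first match of the target phrase.
import Mathlib
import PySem

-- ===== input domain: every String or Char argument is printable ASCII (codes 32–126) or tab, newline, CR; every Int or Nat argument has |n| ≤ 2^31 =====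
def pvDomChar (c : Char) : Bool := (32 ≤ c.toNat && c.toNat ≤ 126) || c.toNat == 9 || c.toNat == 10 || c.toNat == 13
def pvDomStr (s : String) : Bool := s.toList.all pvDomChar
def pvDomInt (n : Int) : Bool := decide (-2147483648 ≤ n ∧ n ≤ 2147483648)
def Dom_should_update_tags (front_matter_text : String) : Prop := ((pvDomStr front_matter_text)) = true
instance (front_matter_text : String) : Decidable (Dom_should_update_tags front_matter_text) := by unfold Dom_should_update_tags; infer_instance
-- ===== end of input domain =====

-- B replaces A's single stateful in_tags pass by a nested scan: for each 'tags:' header,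
-- an inner scan of the immediately following '- ' lines; same return value (alternative decomposition).


-- ===== PORT A =====
-- one step of A's loop over the state (in_tags_section, has_source_themes)
def pvStepA (s : Bool × Bool) (line : String) : Bool × Bool :=
  if PySem.Str.startswith line "tags:" then (true, s.2)
  else if s.1 && PySem.Str.startswith line "- " then
    (s.1, if PySem.Str.isIn "Source Themes" line then true else s.2)
  else if s.1 && !(PySem.Str.startswith line "- ") then (false, s.2)
  else s

-- split('\n') has a non-empty separator, so split? is always some; .getD [] is never taken
def should_update_tags (front_matter_text : String) : Bool :=
  (((PySem.Str.split? (PySem.Str.strip front_matter_text) "\n").getD []).foldl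
    pvStepA (false, false)).2

-- ===== PORT B =====
-- B's inner loop: 'for nxt in lines[i+1:]' — scan the '- ' lines right after a header, break otherwise
def pvInnerB : List String → Bool
  | [] => false
  | nxt :: rest =>
    if !(PySem.Str.startswith nxt "- ") then false
    else if PySem.Str.isIn "Source Themes" nxt then true
    else pvInnerB rest

-- B's outer loop: 'for i, line in enumerate(lines)' — at each 'tags:' header run the inner scan on the tail
def pvOuterB : List String → Bool
  | [] => false
  | line :: rest =>
    if PySem.Str.startswith line "tags:" then
      (if pvInnerB rest then true else pvOuterB rest)
    else pvOuterB rest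

def should_update_tags_alt (front_matter_text : String) : Bool :=
  pvOuterB ((PySem.Str.split? (PySem.Str.strip front_matter_text) "\n").getD [])

-- ===== PRECONDITION & SPEC =====
def Spec_should_update_tags (front_matter_text : String) (out : Bool) : Prop := out = should_update_tags_alt front_matter_text
instance (front_matter_text : String) (out : Bool) : Decidable (Spec_should_update_tags front_matter_text out) := by unfold Spec_should_update_tags; infer_instance

-- ===== CLAIM (what is proved, stated in full; the proofs are below) =====
def Claim_equal_should_update_tags : Prop := ∀ (front_matter_text : String), Dom_should_update_tags front_matter_text → Spec_should_update_tags front_matter_text (should_update_tags front_matter_text)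

-- ===== LEMMAS AND PROOFS =====

-- a line starting with "tags:" cannot also start with "- "
lemma pv_hdr_not_dash (l : String) (h : PySem.Str.startswith l "tags:" = true) :
    PySem.Str.startswith l "- " = false := by
  simp only [PySem.Str.startswith_eq, PySem.Chars.startswith_iff] at h
  obtain ⟨t1, ht⟩ := h
  simp only [PySem.Str.startswith_eq]
  rw [Bool.eq_false_iff]
  intro hc
  rw [PySem.Chars.startswith_iff] at hc
  obtain ⟨t2, ht2⟩ := hc
  rw [← ht, show "tags:".toList = ['t','a','g','s',':'] from rfl,
      show "- ".toList = ['-',' '] from rfl] at ht2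
  simp at ht2

-- A's fold from either flag state with accumulated result h: closed (flag = false) agrees with
-- B's outer scan, open (flag = true) with B's inner scan of the current block followed by the outer scan
lemma pv_fold_char (ls : List String) : ∀ h : Bool,
    ((ls.foldl pvStepA (false, h)).2 = (h || pvOuterB ls)) ∧
    ((ls.foldl pvStepA (true, h)).2 = (h || (pvInnerB ls || pvOuterB ls))) := by
  induction ls with
  | nil => intro h; simp [pvOuterB, pvInnerB]
  | cons l rest ih =>
    intro h
    by_cases hh : PySem.Str.startswith l "tags:" = true
    · have hd := pv_hdr_not_dash l hh
      constructor
      · simp only [List.foldl_cons, pvStepA, hh, if_true, (ih h).2, pvOuterB, hd]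
        cases pvInnerB rest <;> simp
      · simp only [List.foldl_cons, pvStepA, hh, if_true, (ih h).2, pvOuterB, pvInnerB, hd]
        cases pvInnerB rest <;> simp
    · rw [Bool.not_eq_true] at hh
      by_cases hdash : PySem.Str.startswith l "- " = true
      · constructor
        · simp only [List.foldl_cons, pvStepA, hh, hdash, pvOuterB]
          simp only [Bool.false_and, Bool.false_eq_true, if_false]
          exact (ih h).1
        · by_cases hsrc : PySem.Str.isIn "Source Themes" l = true
          · simp only [List.foldl_cons, pvStepA, hh, hdash, hsrc, pvOuterB, pvInnerB]
            simp only [Bool.true_and, Bool.not_true]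
            simp [(ih true).2]
          · rw [Bool.not_eq_true] at hsrc
            simp only [List.foldl_cons, pvStepA, hh, hdash, hsrc, pvOuterB, pvInnerB]
            simp [(ih h).2]
      · rw [Bool.not_eq_true] at hdash
        constructor
        · simp only [List.foldl_cons, pvStepA, hh, hdash, pvOuterB]
          simp only [Bool.false_and]
          simp
          exact (ih h).1
        · simp only [List.foldl_cons, pvStepA, hh, hdash, pvOuterB, pvInnerB]
          simp [(ih h).1]

-- ===== VERDICT (by name: the statement is the Claim_ definition above) =====
theorem should_update_tags_spec : Claim_equal_should_update_tags := by
  intro t _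
  show _ = _
  unfold should_update_tags should_update_tags_alt
  rw [(pv_fold_char _ false).1]
  simp
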